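-- pv_equiv track=rewrite | github.com/Pranjal250605/CrossCam-Multi-View-Player-Tracking-Re-Identification | project1.py | enforce_unique_ids
-- ===== SOURCE A (Python) =====
-- def enforce_unique_ids(ids, feats):
--     seen = set()
--     for i, tid in enumerate(ids):
--         if tid < 0:
--             continue
--         if tid in seen:
--             ids[i] = -1
--         else:
--             seen.add(tid)
--     return seen
-- ===== SOURCE B (Python) =====
-- def enforce_unique_ids(ids, feats):
--     first = {}
--     for i, tid in enumerate(ids):
--         if tid >= 0 and tid not in first:
--             first[tid] = i
--     for i, tid in enumerate(ids):
--         if tid >= 0 and first[tid] != i: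
--             ids[i] = -1
--     return set(first)
-- ===== Notes on version B (the rewrite author's own statement) =====
-- stated objective: alternative
-- what changed: Replaces A's single pass that threads a membership set and marks while scanning with a two-pass decomposition: first build a dict mapping each non-negative id to its first index, then mark ids[i] = -1 exactly where the stored first index differs; the returned set is the dict's key set.
import Mathlib
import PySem

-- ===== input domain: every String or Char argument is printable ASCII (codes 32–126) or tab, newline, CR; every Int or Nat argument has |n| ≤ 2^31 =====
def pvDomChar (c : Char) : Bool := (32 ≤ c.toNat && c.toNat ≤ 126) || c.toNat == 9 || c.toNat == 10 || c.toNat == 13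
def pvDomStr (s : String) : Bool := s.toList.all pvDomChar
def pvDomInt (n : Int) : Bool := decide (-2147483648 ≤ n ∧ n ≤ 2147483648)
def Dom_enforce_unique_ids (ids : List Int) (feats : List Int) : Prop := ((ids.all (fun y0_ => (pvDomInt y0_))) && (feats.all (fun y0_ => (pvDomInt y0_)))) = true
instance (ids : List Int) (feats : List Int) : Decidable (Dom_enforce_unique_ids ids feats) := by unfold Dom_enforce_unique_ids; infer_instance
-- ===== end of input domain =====

-- B replaces A's single set-threading pass with a first-index dict build plus a separate marking
-- pass (alternative decomposition, same cost); both mutate ids identically in Python, and the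
-- equivalence proved here is about the RETURN value (the set of distinct non-negative ids).


-- ===== PORT A =====
def enforce_unique_ids (ids : List Int) (feats : List Int) : List Int :=
  ((PySem.List.enumerate ids 0).foldl
    (fun (st : List Int × PySem.Set Int) (p : Int × Int) =>
      if p.2 < 0 then st
      else if PySem.Set.contains st.2 p.2 then (PySem.List.pySetD st.1 p.1 (-1), st.2)
      else (st.1, PySem.Set.add st.2 p.2))
    (ids, PySem.Set.empty)).2

-- ===== PORT B =====
def enforce_unique_ids_alt (ids : List Int) (feats : List Int) : List Int :=
  let first : PySem.Dict Int Int :=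
    (PySem.List.enumerate ids 0).foldl
      (fun (d : PySem.Dict Int Int) (p : Int × Int) =>
        if p.2 ≥ 0 && !(d.contains p.2) then d.insert p.2 p.1 else d)
      PySem.Dict.empty
  -- second pass: the in-place marking ids[i] = -1 (a side effect in Python; not returned)
  let _ids2 : List Int :=
    (PySem.List.enumerate ids 0).foldl
      (fun (l : List Int) (p : Int × Int) =>
        if p.2 ≥ 0 && !(first.getD p.2 0 == p.1) then PySem.List.pySetD l p.1 (-1) else l)
      ids
  PySem.Set.ofList first.keys

-- ===== PRECONDITION & SPEC =====
def Spec_enforce_unique_ids (ids : List Int) (feats : List Int) (out : List Int) : Prop := out = enforce_unique_ids_alt ids feats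
instance (ids : List Int) (feats : List Int) (out : List Int) : Decidable (Spec_enforce_unique_ids ids feats out) := by unfold Spec_enforce_unique_ids; infer_instance

-- ===== CLAIM (what is proved, stated in full; the proofs are below) =====
def Claim_equal_enforce_unique_ids : Prop := ∀ (ids : List Int) (feats : List Int), Dom_enforce_unique_ids ids feats → Spec_enforce_unique_ids ids feats (enforce_unique_ids ids feats)

-- ===== LEMMAS AND PROOFS =====

-- A's `seen` after the loop is exactly the key list of B's `first` dict after its build loop.
theorem seen_eq_keys (l : List (Int × Int)) (a : List Int) (s : PySem.Set Int)
    (d : PySem.Dict Int Int) (hs : s = d.keys) :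
    (l.foldl
      (fun (st : List Int × PySem.Set Int) (p : Int × Int) =>
        if p.2 < 0 then st
        else if PySem.Set.contains st.2 p.2 then (PySem.List.pySetD st.1 p.1 (-1), st.2)
        else (st.1, PySem.Set.add st.2 p.2))
      (a, s)).2 =
    (l.foldl
      (fun (d : PySem.Dict Int Int) (p : Int × Int) =>
        if p.2 ≥ 0 && !(d.contains p.2) then d.insert p.2 p.1 else d)
      d).keys := by
  induction l generalizing a s d with
  | nil => simpa using hs
  | cons p l ih =>
    simp only [List.foldl_cons]
    by_cases hneg : p.2 < 0
    · rw [if_pos hneg, if_neg (by simp [hneg])]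
      exact ih a s d hs
    · rw [if_neg hneg]
      by_cases hc : d.contains p.2 = true
      · have hsc : PySem.Set.contains s p.2 = true := by
          rw [hs, PySem.Set.contains_iff]
          exact (PySem.Dict.contains_iff_mem_keys d p.2).1 hc
        rw [if_pos hsc, if_neg (by simp [hc])]
        exact ih _ s d hs
      · have hc' : d.contains p.2 = false := by simpa using hc
        have hmem : p.2 ∉ d.keys := fun h => hc ((PySem.Dict.contains_iff_mem_keys d p.2).2 h)
        rw [if_neg (by simp [hs, hmem]),
          if_pos (by simp [hc', not_lt.1 hneg])]
        refine ih a _ _ ?_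
        rw [PySem.Dict.keys_insert_of_not_contains d p.1 hc', hs]
        simp [PySem.Set.add, hmem]

-- B's build loop keeps the key list duplicate-free.
theorem keys_nodup (l : List (Int × Int)) (d : PySem.Dict Int Int) (hd : d.keys.Nodup) :
    (l.foldl
      (fun (d : PySem.Dict Int Int) (p : Int × Int) =>
        if p.2 ≥ 0 && !(d.contains p.2) then d.insert p.2 p.1 else d)
      d).keys.Nodup := by
  induction l generalizing d with
  | nil => simpa using hd
  | cons p l ih =>
    simp only [List.foldl_cons]
    split_ifs with h
    · exact ih _ (PySem.Dict.nodup_keys_insert _ _ _ hd)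
    · exact ih _ hd

-- ===== VERDICT (by name: the statement is the Claim_ definition above) =====
theorem enforce_unique_ids_spec : Claim_equal_enforce_unique_ids := by
  intro ids feats _
  unfold Spec_enforce_unique_ids enforce_unique_ids enforce_unique_ids_alt
  rw [PySem.Set.ofList_eq_self_of_nodup _
    (keys_nodup _ _ (by simp [PySem.Dict.keys_empty]))]
  exact seen_eq_keys _ ids PySem.Set.empty PySem.Dict.empty (by simp [PySem.Dict.keys_empty])
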